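-- pv_equiv track=rewrite | github.com/mazent/CY5677 | CY567x.py | val_tp
-- ===== SOURCE A (Python) =====
-- TX_POW_DBM = [-18, -12, -6, -3, -2, -1, 0, 3]
--
-- def val_tp(dbm):
--     """
--     convert a power to a valid enum
--
--     :param dbm: power
--     :return: CYBLE_BLESS_PWR_LVL_T
--     """
--     pl = None
--     try:
--         pl = 1 + TX_POW_DBM.index(dbm)
--     except ValueError:
--         for elem in TX_POW_DBM:
--             if elem > dbm:
--                 pl = 1 + TX_POW_DBM.index(elem)
--                 break
--     if pl is None:
--         pl = len(TX_POW_DBM)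
--     return pl
-- ===== SOURCE B (Python) =====
-- TX_POW_DBM = [-18, -12, -6, -3, -2, -1, 0, 3]
--
-- def val_tp(dbm):
--     for i, elem in enumerate(TX_POW_DBM):
--         if elem >= dbm:
--             return i + 1
--     return len(TX_POW_DBM)
-- ===== Notes on version B (the rewrite author's own statement) =====
-- stated objective: simpler
-- what changed: Replaces A's two-phase exact-match .index attempt plus a separate first-greater scan (with its own .index re-lookup) by one forward pass over enumerate(TX_POW_DBM) that stops at the first element >= dbm, with the list length as the fallthrough.
import Mathlib
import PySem

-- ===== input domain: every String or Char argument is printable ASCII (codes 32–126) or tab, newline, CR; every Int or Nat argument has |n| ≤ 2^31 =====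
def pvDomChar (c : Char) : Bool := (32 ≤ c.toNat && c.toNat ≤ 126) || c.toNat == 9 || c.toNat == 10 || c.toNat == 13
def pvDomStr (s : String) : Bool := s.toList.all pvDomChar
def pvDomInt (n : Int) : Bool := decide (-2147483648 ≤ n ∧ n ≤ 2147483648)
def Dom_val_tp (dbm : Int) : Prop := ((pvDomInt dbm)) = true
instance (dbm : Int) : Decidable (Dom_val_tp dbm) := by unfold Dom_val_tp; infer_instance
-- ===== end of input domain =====

-- B replaces A's exact-match .index attempt plus separate first-greater scan by one
-- forward pass returning i+1 at the first element >= dbm (objective: simpler).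

-- ===== PORT A =====
def TX_POW_DBM : List Int := [-18, -12, -6, -3, -2, -1, 0, 3]

-- the for-loop of A's except branch: first elem > dbm, looked up again with .index
def valTpScanA (dbm : Int) : List Int → Option Int
  | [] => none
  | e :: rest =>
    if e > dbm then
      match PySem.List.index? TX_POW_DBM e with
      | some j => some (1 + (j : Int))
      | none => none   -- unreachable: e ∈ TX_POW_DBM
    else valTpScanA dbm rest

def val_tp (dbm : Int) : Int :=
  match PySem.List.index? TX_POW_DBM dbm with
  | some i => 1 + (i : Int)
  | none =>
    match valTpScanA dbm TX_POW_DBM with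
    | some pl => pl
    | none => (TX_POW_DBM.length : Int)

-- ===== PORT B =====
-- single pass over enumerate(TX_POW_DBM): first elem >= dbm wins
def valTpLoopB (dbm : Int) : List (Int × Int) → Int
  | [] => (TX_POW_DBM.length : Int)
  | (i, e) :: rest => if e ≥ dbm then i + 1 else valTpLoopB dbm rest

def val_tp_alt (dbm : Int) : Int := valTpLoopB dbm (PySem.List.enumerate TX_POW_DBM)

-- ===== PRECONDITION & SPEC =====
def Spec_val_tp (dbm : Int) (out : Int) : Prop := out = val_tp_alt dbm
instance (dbm : Int) (out : Int) : Decidable (Spec_val_tp dbm out) := by unfold Spec_val_tp; infer_instance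

-- ===== CLAIM (what is proved, stated in full; the proofs are below) =====
def Claim_equal_val_tp : Prop := ∀ (dbm : Int), Dom_val_tp dbm → Spec_val_tp dbm (val_tp dbm)

-- ===== LEMMAS AND PROOFS =====
set_option maxHeartbeats 2000000 in
theorem val_tp_eq (dbm : Int) : val_tp dbm = val_tp_alt dbm := by
  by_cases h1 : dbm = -18; · subst h1; decide
  by_cases h2 : dbm = -12; · subst h2; decide
  by_cases h3 : dbm = -6;  · subst h3; decide
  by_cases h4 : dbm = -3;  · subst h4; decide
  by_cases h5 : dbm = -2;  · subst h5; decide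
  by_cases h6 : dbm = -1;  · subst h6; decide
  by_cases h7 : dbm = 0;   · subst h7; decide
  by_cases h8 : dbm = 3;   · subst h8; decide
  have hnone : PySem.List.index? TX_POW_DBM dbm = none := by
    rw [PySem.List.index?_eq_none_iff]
    simp [TX_POW_DBM]
    exact ⟨h1, h2, h3, h4, h5, h6, h7, h8⟩
  simp only [val_tp, val_tp_alt, hnone]
  have i1 : PySem.List.index? [(-18:Int), -12, -6, -3, -2, -1, 0, 3] (-18) = some 0 := by decide
  have i2 : PySem.List.index? [(-18:Int), -12, -6, -3, -2, -1, 0, 3] (-12) = some 1 := by decide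
  have i3 : PySem.List.index? [(-18:Int), -12, -6, -3, -2, -1, 0, 3] (-6) = some 2 := by decide
  have i4 : PySem.List.index? [(-18:Int), -12, -6, -3, -2, -1, 0, 3] (-3) = some 3 := by decide
  have i5 : PySem.List.index? [(-18:Int), -12, -6, -3, -2, -1, 0, 3] (-2) = some 4 := by decide
  have i6 : PySem.List.index? [(-18:Int), -12, -6, -3, -2, -1, 0, 3] (-1) = some 5 := by decide
  have i7 : PySem.List.index? [(-18:Int), -12, -6, -3, -2, -1, 0, 3] 0 = some 6 := by decide
  have i8 : PySem.List.index? [(-18:Int), -12, -6, -3, -2, -1, 0, 3] 3 = some 7 := by decide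
  simp only [TX_POW_DBM, valTpScanA, valTpLoopB, PySem.List.enumerate_cons,
    PySem.List.enumerate_nil, i1, i2, i3, i4, i5, i6, i7, i8]
  split_ifs <;> simp <;> omega

-- ===== VERDICT (by name: the statement is the Claim_ definition above) =====
theorem val_tp_spec : Claim_equal_val_tp := by
  intro dbm _
  unfold Spec_val_tp
  exact val_tp_eq dbm
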